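-- pv_equiv track=rewrite | github.com/ZokkaXDJ9/PokemonRPBotPublic | PokemonRPBot/commands/rule.py | chunk_message_preserve_formatting
-- ===== SOURCE A (Python) =====
-- def chunk_message_preserve_formatting(text: str, limit: int = 2000) -> list[str]:
--     """
--     Splits 'text' into chunks of at most 'limit' characters each,
--     preserving all original spacing/newlines and attempting
--     not to break words. If a single word is longer than 'limit',
--     it will necessarily be broken mid-word.
--     """
--     chunks = []
--     i = 0
--     n = len(text)
--
--     while i < n:
--         # If the remaining text is short enough, just append it
--         if n - i <= limit:
--             chunks.append(text[i:])
--             break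
--
--         end_index = i + limit
--
--         candidate_break = end_index
--         if not text[end_index - 1].isspace() and end_index < n and not text[end_index].isspace():
--             whitespace_pos = -1
--             for sep in (" ", "\n", "\r", "\t"):
--                 pos = text.rfind(sep, i, end_index)
--                 if pos > whitespace_pos:
--                     whitespace_pos = pos
--
--             # If we found whitespace in the chunk, break there
--             if whitespace_pos != -1 and whitespace_pos >= i:
--                 candidate_break = whitespace_pos
--         if candidate_break == i:
--             candidate_break = end_index
--
--         chunk = text[i:candidate_break]
--         chunks.append(chunk)
--
--         i = candidate_break
--
--         while i < n and text[i].isspace():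
--             i += 1
--
--     return chunks
-- ===== SOURCE B (Python) =====
-- def chunk_message_preserve_formatting(text: str, limit: int = 2000) -> list[str]:
--     """
--     Splits 'text' into chunks of at most 'limit' characters each, preserving
--     original spacing/newlines and trying not to break words.  Instead of
--     scanning each chunk's window with rfind, B precomputes in one forward
--     pass a table prev_ws[k] = index of the rightmost separator before
--     position k (or -1), so each chunk boundary is a single table lookup.
--     """
--     ws = {' ', '\n', '\r', '\t'}
--     n = len(text)
--     prev_ws = []
--     last = -1
--     for k in range(n + 1):
--         prev_ws.append(last)
--         if k < n and text[k] in ws: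
--             last = k
--     chunks = []
--     i = 0
--     while i < n:
--         if n - i <= limit:
--             chunks.append(text[i:])
--             break
--         end = i + limit
--         cand = end
--         if text[end - 1] not in ws and text[end] not in ws:
--             p = prev_ws[end]
--             if p > i:
--                 cand = p
--         chunks.append(text[i:cand])
--         i = cand
--         while i < n and text[i] in ws:
--             i += 1
--     return chunks
-- ===== Notes on version B (the rewrite author's own statement) =====
-- stated objective: alternative
-- what changed: B precomputes in one forward pass a table prev_ws[k] = rightmost separator index before position k, so each chunk boundary becomes a single O(1) table lookup and A's four per-chunk rfind window scans disappear.
-- outside the precondition, e.g. on chunk_message_preserve_formatting('', 0): A returns [], B returns []; on chunk_message_preserve_formatting('  ', 0): A returns [''], B returns ['']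
import Mathlib
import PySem

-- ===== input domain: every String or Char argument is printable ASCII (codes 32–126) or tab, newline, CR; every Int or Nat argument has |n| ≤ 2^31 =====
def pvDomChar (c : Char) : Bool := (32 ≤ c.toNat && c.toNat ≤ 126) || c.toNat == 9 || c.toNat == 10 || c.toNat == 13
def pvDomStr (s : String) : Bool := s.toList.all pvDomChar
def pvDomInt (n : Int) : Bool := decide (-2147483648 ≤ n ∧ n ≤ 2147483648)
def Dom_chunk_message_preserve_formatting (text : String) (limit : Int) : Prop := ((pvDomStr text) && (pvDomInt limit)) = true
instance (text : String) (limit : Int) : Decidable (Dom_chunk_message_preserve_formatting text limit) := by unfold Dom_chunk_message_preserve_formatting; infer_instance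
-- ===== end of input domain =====

-- B precomputes a prev-whitespace table in one forward pass so each chunk boundary is an
-- O(1) lookup instead of A's four per-chunk rfind window scans; objective: alternative.
-- Equality of the RETURN value is claimed on Pre_ (limit ≥ 1), where the Python A terminates.

-- ===== PORT A =====

-- the tuple (" ", "\n", "\r", "\t")
def pvAws4 : List Char := [' ', '\n', '\r', '\t']

-- text.rfind(sep, a, b) for a single-character sep and in-range bounds 0 ≤ a ≤ b ≤ len(text)
-- (the only way A calls it): highest index in [a, b) holding sep, else -1.  Ported by hand,
-- scanning from the right exactly as CPython does; the fuel argument is b - a.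
def pvRfindChar (cs : List Char) (c : Char) (a : Nat) : Nat → Int
  | 0 => -1
  | k+1 => if cs.getD (a+k) ' ' = c then ((a+k : Nat) : Int) else pvRfindChar cs c a k

-- 'whitespace_pos = -1; for sep in (...): pos = text.rfind(sep, i, e); if pos > whitespace_pos: ...'
def pvAwp (cs : List Char) (i e : Nat) : Int :=
  pvAws4.foldl (fun wp sep => let pos := pvRfindChar cs sep i (e - i); if pos > wp then pos else wp) (-1)

-- 'while i < n and text[i].isspace(): i += 1'; fuel ≥ cs.length - i makes it exact
def pvASkip (cs : List Char) (i : Nat) : Nat → Nat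
  | 0 => i
  | f+1 => if i < cs.length ∧ PySem.Chars.isspace (cs.getD i ' ') = true then pvASkip cs (i+1) f else i

-- the outer 'while i < n'; fuel makes the recursion structural (the Python loop does not
-- terminate for limit ≤ 0 on most inputs, which Pre_ excludes; each iteration advances i by
-- ≥ 1 when limit ≥ 1, so fuel = n + 1 is exact there)
def pvALoop (cs : List Char) (limit : Int) (i : Nat) : Nat → List String
  | 0 => []
  | fuel+1 =>
    let n := cs.length
    if i < n then
      if (n : Int) - i ≤ limit then [String.ofList (cs.drop i)]          -- text[i:], 0 ≤ i ≤ n: exact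
      else
        let e := i + limit.toNat                                     -- end_index = i + limit (limit ≥ 1 on Pre_, so toNat is exact)
        let cand1 : Int :=
          if ¬ PySem.Chars.isspace (cs.getD (e-1) ' ') = true ∧ e < n ∧ ¬ PySem.Chars.isspace (cs.getD e ' ') = true then
            let wp := pvAwp cs i e
            if wp ≠ -1 ∧ (i:Int) ≤ wp then wp else (e : Int)
          else (e : Int)
        let cand : Nat := if cand1 = (i:Int) then e else cand1.toNat -- candidate_break; cand1 ∈ {e} ∪ [i, e) is ≥ 0, toNat exact
        String.ofList ((cs.drop i).take (cand - i)) ::                   -- text[i:cand], i ≤ cand ≤ n: exact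
          pvALoop cs limit (pvASkip cs cand cs.length) fuel
    else []

def chunk_message_preserve_formatting (text : String) (limit : Int) : List String :=
  pvALoop text.toList limit 0 (text.toList.length + 1)

-- ===== PORT B =====

-- 'c in ws' for ws = {' ', '\n', '\r', '\t'}
def pvBws (c : Char) : Bool := c == ' ' || c == '\n' || c == '\r' || c == '\t'

-- 'prev_ws = []; last = -1; for k in range(n+1): prev_ws.append(last); if k < n and text[k] in ws: last = k'
-- state after m iterations: (prev_ws, last); called with m = n + 1
def pvBBuild (cs : List Char) : Nat → (List Int × Int)
  | 0 => ([], -1)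
  | k+1 =>
    let st := pvBBuild cs k
    if k < cs.length ∧ pvBws (cs.getD k ' ') = true then (st.1 ++ [st.2], (k:Int))
    else (st.1 ++ [st.2], st.2)

-- 'while i < n and text[i] in ws: i += 1'; fuel ≥ cs.length - i makes it exact
def pvBSkip (cs : List Char) (i : Nat) : Nat → Nat
  | 0 => i
  | f+1 => if i < cs.length ∧ pvBws (cs.getD i ' ') = true then pvBSkip cs (i+1) f else i

def pvBLoop (cs : List Char) (prev : List Int) (limit : Int) (i : Nat) : Nat → List String
  | 0 => []
  | fuel+1 =>
    let n := cs.length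
    if i < n then
      if (n : Int) - i ≤ limit then [String.ofList (cs.drop i)]
      else
        let e := i + limit.toNat
        let cand : Nat :=
          if ¬ pvBws (cs.getD (e-1) ' ') = true ∧ ¬ pvBws (cs.getD e ' ') = true then
            let p := prev.getD e (-1)                                -- prev_ws[end]: end < n < len(prev_ws), in range: exact
            if (i:Int) < p then p.toNat else e
          else e
        String.ofList ((cs.drop i).take (cand - i)) :: pvBLoop cs prev limit (pvBSkip cs cand cs.length) fuel
    else []

def chunk_message_preserve_formatting_alt (text : String) (limit : Int) : List String :=
  pvBLoop text.toList (pvBBuild text.toList (text.toList.length + 1)).1 limit 0 (text.toList.length + 1)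

-- ===== PRECONDITION & SPEC =====
-- Pre_ excludes limit ≤ 0: there the Python A loops forever on any text with a character that
-- is not whitespace, raises IndexError for negative limits on short texts, and on the remaining
-- degenerate inputs (empty or, for limit = 0, all-whitespace text) returns [] / [''] via an
-- accidental empty chunk — B happens to agree on those returning corners.
def Pre_chunk_message_preserve_formatting (text : String) (limit : Int) : Prop := 1 ≤ limit
instance (text : String) (limit : Int) : Decidable (Pre_chunk_message_preserve_formatting text limit) := by unfold Pre_chunk_message_preserve_formatting; infer_instance

def pvWitness_chunk_message_preserve_formatting : String × Int := ("hello brave new world", 8)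

def Spec_chunk_message_preserve_formatting (text : String) (limit : Int) (out : List String) : Prop := out = chunk_message_preserve_formatting_alt text limit
instance (text : String) (limit : Int) (out : List String) : Decidable (Spec_chunk_message_preserve_formatting text limit out) := by unfold Spec_chunk_message_preserve_formatting; infer_instance

-- ===== CLAIM (what is proved, stated in full; the proofs are below) =====
def Claim_equal_chunk_message_preserve_formatting : Prop := ∀ (text : String) (limit : Int), Dom_chunk_message_preserve_formatting text limit → Pre_chunk_message_preserve_formatting text limit → Spec_chunk_message_preserve_formatting text limit (chunk_message_preserve_formatting text limit)

-- ===== LEMMAS AND PROOFS =====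

-- pvPrevAt cs k = the 'last' state before iteration k of B's build loop
def pvPrevAt (cs : List Char) : Nat → Int
  | 0 => -1
  | k+1 => if k < cs.length ∧ pvBws (cs.getD k ' ') = true then (k:Int) else pvPrevAt cs k

lemma pvBBuild_eq (cs : List Char) :
    ∀ m : Nat, pvBBuild cs m = ((List.range m).map (pvPrevAt cs), pvPrevAt cs m) := by
  intro m
  induction m with
  | zero => rfl
  | succ m ih =>
    simp only [pvBBuild, ih, List.range_succ, List.map_append, List.map_cons, List.map_nil, pvPrevAt]
    split_ifs <;> rfl

lemma pvPrev_lookup (cs : List Char) (m e : Nat) (h : e < m) :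
    ((pvBBuild cs m).1).getD e (-1) = pvPrevAt cs e := by
  rw [pvBBuild_eq]
  simp [List.getD, List.getElem?_map, List.getElem?_range, h]

lemma pvPrev_lt (cs : List Char) : ∀ e : Nat, pvPrevAt cs e < (e:Int) := by
  intro e
  induction e with
  | zero => simp [pvPrevAt]
  | succ e ih =>
    simp only [pvPrevAt]
    split_ifs <;> push_cast <;> omega

lemma pv_char_toNat_inj (c d : Char) : c.toNat = d.toNat ↔ c = d := by
  constructor
  · intro h; exact Char.ext (UInt32.toNat_inj.mp h)
  · intro h; rw [h]

lemma pv_beq_char (c d : Char) : (c == d) = decide (c.toNat = d.toNat) := by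
  by_cases h : c = d
  · subst h; simp
  · have h2 : ¬ c.toNat = d.toNat := fun he => h ((pv_char_toNat_inj c d).mp he)
    simp [h, h2]

-- on the domain (printable ASCII + tab/LF/CR) Python's isspace is membership in " \n\r\t"
lemma pv_isspace_dom (c : Char) (h : pvDomChar c = true) : PySem.Chars.isspace c = pvBws c := by
  rw [Bool.eq_iff_iff]
  simp only [pvBws, pv_beq_char, PySem.Chars.isspace]
  simp only [pvDomChar, Bool.or_eq_true, Bool.and_eq_true, decide_eq_true_eq,
    beq_iff_eq,
    (by decide : ' '.toNat = 32), (by decide : '\t'.toNat = 9), (by decide : '\n'.toNat = 10),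
    (by decide : '\r'.toNat = 13)] at h ⊢
  omega

lemma pv_dom_getD (cs : List Char) (h : cs.all pvDomChar = true) (j : Nat) :
    pvDomChar (cs.getD j ' ') = true := by
  rcases hx : cs[j]? with _ | x
  · simp [List.getD, hx]; decide
  · have hm : x ∈ cs := List.mem_of_getElem? hx
    simp only [List.getD, hx, Option.getD_some]
    exact List.all_eq_true.mp h x hm

lemma pv_rfind_bounds (cs : List Char) (c : Char) (a : Nat) :
    ∀ k : Nat, -1 ≤ pvRfindChar cs c a k ∧ pvRfindChar cs c a k < (a:Int) + k ∧
      (pvRfindChar cs c a k ≠ -1 → (a:Int) ≤ pvRfindChar cs c a k) := by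
  intro k
  induction k with
  | zero => simp [pvRfindChar]; omega
  | succ k ih =>
    simp only [pvRfindChar]
    split_ifs with h
    · push_cast; omega
    · push_cast at ih ⊢; omega

-- the head step of the four-rfind maximum: it inspects the top position of the window
lemma pv_wp_succ (cs : List Char) (i t : Nat) :
    pvAwp cs i (i+t+2) = if pvBws (cs.getD (i+t+1) ' ') = true then ((i+t+1 : Nat) : Int) else pvAwp cs i (i+t+1) := by
  have hk2 : i + t + 2 - i = t + 2 := by omega
  have hk1 : i + t + 1 - i = t + 1 := by omega
  have hr : ∀ c : Char, pvRfindChar cs c i (t+2)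
      = if cs.getD (i+(t+1)) ' ' = c then ((i+(t+1) : Nat) : Int) else pvRfindChar cs c i (t+1) := by
    intro c; simp [pvRfindChar]
  have hadd : i + (t+1) = i + t + 1 := by omega
  have b1 := pv_rfind_bounds cs ' ' i (t+1)
  have b2 := pv_rfind_bounds cs '\n' i (t+1)
  have b3 := pv_rfind_bounds cs '\r' i (t+1)
  have b4 := pv_rfind_bounds cs '\t' i (t+1)
  simp only [pvAwp, pvAws4, List.foldl, hk2, hk1, hr, hadd]
  by_cases hws : pvBws (cs.getD (i+t+1) ' ') = true
  · rw [if_pos hws]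
    have hws' := hws
    simp only [pvBws, Bool.or_eq_true, beq_iff_eq] at hws'
    rcases hws' with ((h | h) | h) | h
    · rw [if_pos h, if_neg (show ¬ cs.getD (i+t+1) ' ' = '\n' by rw [h]; decide),
        if_neg (show ¬ cs.getD (i+t+1) ' ' = '\r' by rw [h]; decide),
        if_neg (show ¬ cs.getD (i+t+1) ' ' = '\t' by rw [h]; decide)]
      split_ifs <;> push_cast at * <;> omega
    · rw [if_pos h, if_neg (show ¬ cs.getD (i+t+1) ' ' = ' ' by rw [h]; decide),
        if_neg (show ¬ cs.getD (i+t+1) ' ' = '\r' by rw [h]; decide),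
        if_neg (show ¬ cs.getD (i+t+1) ' ' = '\t' by rw [h]; decide)]
      split_ifs <;> push_cast at * <;> omega
    · rw [if_pos h, if_neg (show ¬ cs.getD (i+t+1) ' ' = ' ' by rw [h]; decide),
        if_neg (show ¬ cs.getD (i+t+1) ' ' = '\n' by rw [h]; decide),
        if_neg (show ¬ cs.getD (i+t+1) ' ' = '\t' by rw [h]; decide)]
      split_ifs <;> push_cast at * <;> omega
    · rw [if_pos h, if_neg (show ¬ cs.getD (i+t+1) ' ' = ' ' by rw [h]; decide),
        if_neg (show ¬ cs.getD (i+t+1) ' ' = '\n' by rw [h]; decide),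
        if_neg (show ¬ cs.getD (i+t+1) ' ' = '\r' by rw [h]; decide)]
      split_ifs <;> push_cast at * <;> omega
  · rw [if_neg hws]
    have hws' := hws
    simp only [pvBws, Bool.or_eq_true, beq_iff_eq, not_or] at hws'
    obtain ⟨⟨⟨h1, h2⟩, h3⟩, h4⟩ := hws'
    rw [if_neg h1, if_neg h2, if_neg h3, if_neg h4]

-- base window of size 1
lemma pv_wp_one (cs : List Char) (i : Nat) :
    pvAwp cs i (i+1) = if pvBws (cs.getD i ' ') = true then (i:Int) else -1 := by
  have hk : i + 1 - i = 1 := by omega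
  have hr : ∀ c : Char, pvRfindChar cs c i 1 = if cs.getD i ' ' = c then (i:Int) else -1 := by
    intro c; simp [pvRfindChar]
  simp only [pvAwp, pvAws4, List.foldl, hk, hr]
  by_cases hws : pvBws (cs.getD i ' ') = true
  · rw [if_pos hws]
    have hws' := hws
    simp only [pvBws, Bool.or_eq_true, beq_iff_eq] at hws'
    rcases hws' with ((h | h) | h) | h
    · rw [if_pos h, if_neg (show ¬ cs.getD i ' ' = '\n' by rw [h]; decide),
        if_neg (show ¬ cs.getD i ' ' = '\r' by rw [h]; decide),
        if_neg (show ¬ cs.getD i ' ' = '\t' by rw [h]; decide)]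
      split_ifs <;> push_cast at * <;> omega
    · rw [if_pos h, if_neg (show ¬ cs.getD i ' ' = ' ' by rw [h]; decide),
        if_neg (show ¬ cs.getD i ' ' = '\r' by rw [h]; decide),
        if_neg (show ¬ cs.getD i ' ' = '\t' by rw [h]; decide)]
      split_ifs <;> push_cast at * <;> omega
    · rw [if_pos h, if_neg (show ¬ cs.getD i ' ' = ' ' by rw [h]; decide),
        if_neg (show ¬ cs.getD i ' ' = '\n' by rw [h]; decide),
        if_neg (show ¬ cs.getD i ' ' = '\t' by rw [h]; decide)]
      split_ifs <;> push_cast at * <;> omega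
    · rw [if_pos h, if_neg (show ¬ cs.getD i ' ' = ' ' by rw [h]; decide),
        if_neg (show ¬ cs.getD i ' ' = '\n' by rw [h]; decide),
        if_neg (show ¬ cs.getD i ' ' = '\r' by rw [h]; decide)]
      split_ifs <;> push_cast at * <;> omega
  · rw [if_neg hws]
    have hws' := hws
    simp only [pvBws, Bool.or_eq_true, beq_iff_eq, not_or] at hws'
    obtain ⟨⟨⟨h1, h2⟩, h3⟩, h4⟩ := hws'
    rw [if_neg h1, if_neg h2, if_neg h3, if_neg h4]
    simp

-- A's four-rfind maximum over [i, e) equals the global prev-whitespace table clipped at i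
lemma pv_awp_prev (cs : List Char) (i : Nat) :
    ∀ t : Nat, i + t + 1 ≤ cs.length →
      pvAwp cs i (i+t+1) = if (i:Int) ≤ pvPrevAt cs (i+t+1) then pvPrevAt cs (i+t+1) else -1 := by
  intro t
  induction t with
  | zero =>
    intro hlen
    have hi : i < cs.length := by omega
    have hlt := pvPrev_lt cs i
    rw [pv_wp_one]
    simp only [pvPrevAt, hi, true_and]
    split_ifs <;> first | rfl | omega
  | succ t ih =>
    intro hlen
    have hrw : i + (t+1) + 1 = i + t + 2 := by omega
    have hhead : i + t + 1 < cs.length := by omega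
    rw [hrw, pv_wp_succ cs i t]
    have hprev : pvPrevAt cs (i+t+2) =
        if pvBws (cs.getD (i+t+1) ' ') = true then ((i+t+1 : Nat) : Int) else pvPrevAt cs (i+t+1) := by
      simp only [pvPrevAt, hhead, true_and]
    rw [hprev]
    by_cases hws : pvBws (cs.getD (i+t+1) ' ') = true
    · rw [if_pos hws, if_pos hws, if_pos (by push_cast; omega : (i:Int) ≤ ((i+t+1 : Nat) : Int))]
    · rw [if_neg hws, if_neg hws, ih (by omega)]

-- the per-iteration break position is the same in both programs
lemma pv_brk_eq (cs : List Char) (hdom : cs.all pvDomChar = true) (limit : Int)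
    (hl : 1 ≤ limit) (i : Nat) (hlt : ¬ ((cs.length : Int) - i ≤ limit)) :
    (if (if ¬ PySem.Chars.isspace (cs.getD (i + limit.toNat - 1) ' ') = true ∧ i + limit.toNat < cs.length ∧ ¬ PySem.Chars.isspace (cs.getD (i + limit.toNat) ' ') = true then
           if pvAwp cs i (i + limit.toNat) ≠ -1 ∧ (i:Int) ≤ pvAwp cs i (i + limit.toNat) then pvAwp cs i (i + limit.toNat) else ((i + limit.toNat : Nat) : Int)
         else ((i + limit.toNat : Nat) : Int)) = (i:Int)
     then i + limit.toNat
     else (if ¬ PySem.Chars.isspace (cs.getD (i + limit.toNat - 1) ' ') = true ∧ i + limit.toNat < cs.length ∧ ¬ PySem.Chars.isspace (cs.getD (i + limit.toNat) ' ') = true then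
             if pvAwp cs i (i + limit.toNat) ≠ -1 ∧ (i:Int) ≤ pvAwp cs i (i + limit.toNat) then pvAwp cs i (i + limit.toNat) else ((i + limit.toNat : Nat) : Int)
           else ((i + limit.toNat : Nat) : Int)).toNat)
    = (if ¬ pvBws (cs.getD (i + limit.toNat - 1) ' ') = true ∧ ¬ pvBws (cs.getD (i + limit.toNat) ' ') = true then
         if (i:Int) < ((pvBBuild cs (cs.length + 1)).1).getD (i + limit.toNat) (-1) then (((pvBBuild cs (cs.length + 1)).1).getD (i + limit.toNat) (-1)).toNat else i + limit.toNat
       else i + limit.toNat) := by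
  have hlt' : (1:Int) ≤ limit.toNat := by omega
  have hie : i < i + limit.toNat := by omega
  have hen : i + limit.toNat < cs.length := by omega
  have hsp1 := pv_isspace_dom _ (pv_dom_getD cs hdom (i + limit.toNat - 1))
  have hsp2 := pv_isspace_dom _ (pv_dom_getD cs hdom (i + limit.toNat))
  rw [hsp1, hsp2, pvPrev_lookup cs (cs.length + 1) (i + limit.toNat) (by omega)]
  by_cases hg : ¬ pvBws (cs.getD (i + limit.toNat - 1) ' ') = true ∧ ¬ pvBws (cs.getD (i + limit.toNat) ' ') = true
  · rw [if_pos (⟨hg.1, hen, hg.2⟩ : _ ∧ _ ∧ _), if_pos hg]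
    have ht : i + limit.toNat = i + (limit.toNat - 1) + 1 := by omega
    have hwp : pvAwp cs i (i + limit.toNat)
        = if (i:Int) ≤ pvPrevAt cs (i + limit.toNat) then pvPrevAt cs (i + limit.toNat) else -1 := by
      rw [ht]; exact pv_awp_prev cs i (limit.toNat - 1) (by omega)
    have hPlt : pvPrevAt cs (i + limit.toNat) < ((i + limit.toNat : Nat) : Int) := pvPrev_lt cs _
    set P := pvPrevAt cs (i + limit.toNat) with hP
    by_cases hiP : (i:Int) < P
    · have hle : (i:Int) ≤ P := le_of_lt hiP
      rw [if_pos hiP, hwp, if_pos hle,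
        if_pos (⟨by omega, hle⟩ : _ ∧ _), if_neg (by omega : ¬ P = (i:Int))]
    · rw [if_neg hiP]
      by_cases hieq : (i:Int) ≤ P
      · have hPi : P = (i:Int) := by omega
        rw [hwp, if_pos hieq, if_pos (⟨by omega, hieq⟩ : _ ∧ _), hPi, if_pos rfl]
      · rw [hwp, if_neg hieq, if_neg (by simp : ¬ ((-1:Int) ≠ -1 ∧ (i:Int) ≤ -1)),
          if_neg (by push_cast; omega : ¬ ((i + limit.toNat : Nat) : Int) = (i:Int))]
        omega
  · rw [if_neg (fun hc : _ ∧ _ ∧ _ => hg ⟨hc.1, hc.2.2⟩), if_neg hg,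
      if_neg (by push_cast; omega : ¬ ((i + limit.toNat : Nat) : Int) = (i:Int))]
    omega

lemma pv_skip_eq (cs : List Char) (hdom : cs.all pvDomChar = true) :
    ∀ (f i : Nat), pvASkip cs i f = pvBSkip cs i f := by
  intro f
  induction f with
  | zero => intro i; rfl
  | succ f ih =>
    intro i
    simp only [pvASkip, pvBSkip, pv_isspace_dom _ (pv_dom_getD cs hdom i)]
    split_ifs <;> simp [ih]

lemma pv_loop_eq (cs : List Char) (hdom : cs.all pvDomChar = true) (limit : Int) (hl : 1 ≤ limit) :
    ∀ (fuel i : Nat), pvALoop cs limit i fuel = pvBLoop cs (pvBBuild cs (cs.length + 1)).1 limit i fuel := by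
  intro fuel
  induction fuel with
  | zero => intro i; rfl
  | succ fuel ih =>
    intro i
    simp only [pvALoop, pvBLoop]
    by_cases hi : i < cs.length
    · rw [if_pos hi, if_pos hi]
      by_cases hshort : (cs.length : Int) - i ≤ limit
      · rw [if_pos hshort, if_pos hshort]
      · rw [if_neg hshort, if_neg hshort]
        have hb := pv_brk_eq cs hdom limit hl i hshort
        simp only at hb
        rw [hb, pv_skip_eq cs hdom, ih]
    · rw [if_neg hi, if_neg hi]

-- ===== VERDICT (by name: the statement is the Claim_ definition above) =====
theorem chunk_message_preserve_formatting_spec : Claim_equal_chunk_message_preserve_formatting := by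
  intro text limit hdom hpre
  unfold Spec_chunk_message_preserve_formatting chunk_message_preserve_formatting chunk_message_preserve_formatting_alt
  have hd : text.toList.all pvDomChar = true := by
    have := hdom
    unfold Dom_chunk_message_preserve_formatting pvDomStr at this
    simp only [Bool.and_eq_true] at this
    exact this.1
  exact pv_loop_eq text.toList hd limit hpre _ 0
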